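-- pv_equiv track=rewrite | github.com/Halw-gnun/Rosalind | bioinformatics_stronghold/15_LIA/15_LIA.py | mendels_second_law
-- ===== SOURCE A (Python) =====
-- def mendels_second_law(dad, mom="AaBb"):
--     egg = []
--     sperm = []
--     genotypes = []
--     genotype = []
--     sum_genotypes = {}
--     for i in mom[0:2]:
--         for j in dad[2:4]:
--             egg.append(i + j)
--     for i in dad[0:2]:
--         for j in mom[2:4]:
--             sperm.append(i + j)
--     for e in egg:
--         for s in sperm:
--             genotype = "".join(sorted(e[0] + s[0]) + sorted(e[1] +s[1]))
--             genotypes.append(genotype)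
--     for gene in genotypes:
--         if gene in sum_genotypes.keys():
--             sum_genotypes[gene] += 1
--         else:
--             sum_genotypes[gene] = 1
--     return sum_genotypes
-- ===== SOURCE B (Python) =====
-- def mendels_second_law(dad, mom="AaBb"):
--     # product-of-marginals: tally each gene's offspring pairs independently,
--     # then combine counts by multiplication instead of enumerating all 16 matings
--     def tally(keys):
--         t = {}
--         for k in keys:
--             t[k] = t.get(k, 0) + 1
--         return t
--     gene1 = [tally("".join(sorted(m + d)) for d in dad[0:2]) for m in mom[0:2]]
--     gene2 = [tally("".join(sorted(d + m)) for m in mom[2:4]) for d in dad[2:4]]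
--     result = {}
--     for t1 in gene1:
--         for t2 in gene2:
--             for k1, c1 in t1.items():
--                 for k2, c2 in t2.items():
--                     k = k1 + k2
--                     result[k] = result.get(k, 0) + c1 * c2
--     return result
-- ===== Notes on version B (the rewrite author's own statement) =====
-- stated objective: alternative
-- what changed: B computes the two per-gene offspring distributions independently (a tally per maternal allele for gene 1 and per paternal allele for gene 2) and builds the result by multiplying marginal counts, instead of A's enumeration of all 16 egg-sperm matings with a sort and a +1 count for each.
import Mathlib
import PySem

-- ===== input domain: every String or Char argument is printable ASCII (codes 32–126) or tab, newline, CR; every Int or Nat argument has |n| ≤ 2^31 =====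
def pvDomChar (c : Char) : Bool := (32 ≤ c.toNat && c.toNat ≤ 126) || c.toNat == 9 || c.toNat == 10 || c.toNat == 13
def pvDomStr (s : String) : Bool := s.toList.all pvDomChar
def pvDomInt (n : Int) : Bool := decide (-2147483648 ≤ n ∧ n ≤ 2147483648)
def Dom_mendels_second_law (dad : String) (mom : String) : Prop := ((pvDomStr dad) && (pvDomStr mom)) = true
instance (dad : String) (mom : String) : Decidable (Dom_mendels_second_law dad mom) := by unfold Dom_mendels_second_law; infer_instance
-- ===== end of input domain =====

-- B replaces A's enumeration of all 16 matings with two independent per-gene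
-- tallies (marginals) combined by multiplying counts; objective: alternative
-- decomposition (same output, same key order).


-- ===== PORT A =====
-- 1-char Python strings (iteration over a string, e[0], s[0]) are ported as Char;
-- the 2-char strings i+j become Char × Char; "".join of the sorted char lists is String.ofList.
def mendels_second_law (dad : String) (mom : String) : List (String × Int) :=
  let momL := mom.toList
  let dadL := dad.toList
  let egg : List (Char × Char) :=
    (PySem.List.slice momL (some 0) (some 2)).foldl (fun acc i =>
      (PySem.List.slice dadL (some 2) (some 4)).foldl (fun acc j => acc ++ [(i, j)]) acc) []
  let sperm : List (Char × Char) :=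
    (PySem.List.slice dadL (some 0) (some 2)).foldl (fun acc i =>
      (PySem.List.slice momL (some 2) (some 4)).foldl (fun acc j => acc ++ [(i, j)]) acc) []
  let genotypes : List String :=
    egg.foldl (fun acc e =>
      sperm.foldl (fun acc s =>
        acc ++ [String.ofList (PySem.List.sorted [e.1, s.1] (fun x => x) ++
                           PySem.List.sorted [e.2, s.2] (fun x => x))]) acc) []
  let sum_genotypes : PySem.Dict String Int :=
    genotypes.foldl (fun d gene =>
      if d.contains gene then d.insert gene (d.getD gene 0 + 1) else d.insert gene 1) ∅
  sum_genotypes.items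

-- ===== PORT B =====
-- product of per-gene marginals: tally each gene's offspring pairs independently,
-- combine counts by multiplication ('tally' is Source B's helper; .items folds port the
-- 'for k, c in t.items()' loops)
def mendels_second_law_alt (dad : String) (mom : String) : List (String × Int) :=
  let momL := mom.toList
  let dadL := dad.toList
  let tally : List String → PySem.Dict String Int := fun ks =>
    ks.foldl (fun t k => t.insert k (t.getD k 0 + 1)) PySem.Dict.empty
  let gene1 : List (PySem.Dict String Int) :=
    (PySem.List.slice momL (some 0) (some 2)).map (fun m =>
      tally ((PySem.List.slice dadL (some 0) (some 2)).map (fun d =>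
        String.ofList (PySem.List.sorted [m, d] (fun x => x)))))
  let gene2 : List (PySem.Dict String Int) :=
    (PySem.List.slice dadL (some 2) (some 4)).map (fun d =>
      tally ((PySem.List.slice momL (some 2) (some 4)).map (fun m2 =>
        String.ofList (PySem.List.sorted [d, m2] (fun x => x)))))
  let result : PySem.Dict String Int :=
    gene1.foldl (fun r t1 =>
      gene2.foldl (fun r t2 =>
        t1.items.foldl (fun r p1 =>
          t2.items.foldl (fun r p2 =>
            r.insert (p1.1 ++ p2.1) (r.getD (p1.1 ++ p2.1) 0 + p1.2 * p2.2)) r) r) r) PySem.Dict.empty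
  result.items

-- ===== PRECONDITION & SPEC =====
def Spec_mendels_second_law (dad : String) (mom : String) (out : List (String × Int)) : Prop := out = mendels_second_law_alt dad mom
instance (dad : String) (mom : String) (out : List (String × Int)) : Decidable (Spec_mendels_second_law dad mom out) := by unfold Spec_mendels_second_law; infer_instance

-- ===== CLAIM (what is proved, stated in full; the proofs are below) =====
def Claim_equal_mendels_second_law : Prop := ∀ (dad : String) (mom : String), Dom_mendels_second_law dad mom → Spec_mendels_second_law dad mom (mendels_second_law dad mom)

-- ===== LEMMAS AND PROOFS =====

-- A's counting body: the one +1 step (the contains-branch is redundant: getD gives 0 on a missing key)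
def countStep (r : PySem.Dict String Int) (k : String) : PySem.Dict String Int :=
  r.insert k (r.getD k 0 + 1)

lemma count_step (d : PySem.Dict String Int) (gene : String) :
    (if d.contains gene then d.insert gene (d.getD gene 0 + 1) else d.insert gene 1) =
    countStep d gene := by
  unfold countStep
  by_cases h : d.contains gene = true
  · simp [h]
  · simp only [Bool.not_eq_true] at h
    simp [h, PySem.Dict.getD_of_not_contains d 0 h]

-- items of an insert, by whether the key is present
lemma items_insert_pos {κ ν : Type} [BEq κ] (e : PySem.Dict κ ν) (k : κ) (u : ν)
    (hc : e.contains k = true) :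
    (e.insert k u).items = e.items.map (fun p => if p.1 == k then (k, u) else p) := by
  simp [PySem.Dict.insert, hc]

lemma items_insert_neg {κ ν : Type} [BEq κ] (e : PySem.Dict κ ν) (k : κ) (u : ν)
    (hc : e.contains k = false) :
    (e.insert k u).items = e.items ++ [(k, u)] := by
  simp [PySem.Dict.insert, hc]

-- overwriting an existing key keeps its position: the two inserts at k commute past an insert at k' ≠ k
lemma ins_comm {κ ν : Type} [BEq κ] [LawfulBEq κ] (d : PySem.Dict κ ν) (k k' : κ) (v v' w : ν) (h : k ≠ k') :
    ((d.insert k v).insert k' w).insert k v' = (d.insert k v').insert k' w := by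
  apply PySem.Dict.ext
  have hck2 : ((d.insert k v).insert k' w).contains k = true := by
    simp [PySem.Dict.contains_insert]
  rw [items_insert_pos _ _ _ hck2]
  by_cases hk : d.contains k = true <;> by_cases hk' : d.contains k' = true
  · rw [items_insert_pos _ _ _ (by simp [PySem.Dict.contains_insert, hk'] : (d.insert k v).contains k' = true),
        items_insert_pos _ _ _ hk,
        items_insert_pos _ _ _ (by simp [PySem.Dict.contains_insert, hk'] : (d.insert k v').contains k' = true),
        items_insert_pos _ _ _ hk]
    simp only [List.map_map]
    apply List.map_congr_left; intro p hp
    by_cases h1 : p.1 = k <;> by_cases h2 : p.1 = k' <;> simp_all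
  · rw [items_insert_neg _ _ _ (by simp [PySem.Dict.contains_insert, Ne.symm h, (by simpa using hk' : d.contains k' = false)] : (d.insert k v).contains k' = false),
        items_insert_pos _ _ _ hk,
        items_insert_neg _ _ _ (by simp [PySem.Dict.contains_insert, Ne.symm h, (by simpa using hk' : d.contains k' = false)] : (d.insert k v').contains k' = false),
        items_insert_pos _ _ _ hk]
    simp only [List.map_append, List.map_map]
    congr 1
    · apply List.map_congr_left; intro p hp
      by_cases h1 : p.1 = k <;> simp_all
    · simp [Ne.symm h]
  · have hkf : d.contains k = false := by simpa using hk
    have hnomem : ∀ p ∈ d.items, (p.1 == k) = false := by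
      intro p hp
      have := hkf; simp [PySem.Dict.contains] at this
      simpa [beq_eq_false_iff_ne] using this p.1 p.2 hp
    rw [items_insert_pos _ _ _ (by simp [PySem.Dict.contains_insert, hk'] : (d.insert k v).contains k' = true),
        items_insert_neg _ _ _ hkf,
        items_insert_pos _ _ _ (by simp [PySem.Dict.contains_insert, hk'] : (d.insert k v').contains k' = true),
        items_insert_neg _ _ _ hkf]
    simp only [List.map_append, List.map_map]
    congr 1
    · apply List.map_congr_left; intro p hp
      have := hnomem p hp
      by_cases h2 : p.1 = k' <;> simp_all
    · simp [h]
  · have hkf : d.contains k = false := by simpa using hk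
    have hk'f : d.contains k' = false := by simpa using hk'
    have hnomem : ∀ p ∈ d.items, (p.1 == k) = false := by
      intro p hp
      have := hkf; simp [PySem.Dict.contains] at this
      simpa [beq_eq_false_iff_ne] using this p.1 p.2 hp
    rw [items_insert_neg _ _ _ (by simp [PySem.Dict.contains_insert, Ne.symm h, hk'f] : (d.insert k v).contains k' = false),
        items_insert_neg _ _ _ hkf,
        items_insert_neg _ _ _ (by simp [PySem.Dict.contains_insert, Ne.symm h, hk'f] : (d.insert k v').contains k' = false),
        items_insert_neg _ _ _ hkf]
    simp only [List.map_append]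
    rw [List.map_congr_left (fun p hp => by simp [hnomem p hp] : ∀ p ∈ d.items, (fun p => if p.1 == k then (k, v') else p) p = id p)]
    simp [Ne.symm h]

-- counter on one- and two-element key lists, symbolically
lemma counter_one (p : String) : (PySem.Dict.counter [p]).items = [(p, 1)] := by
  simp [PySem.Dict.counter, PySem.Dict.modify, PySem.Dict.insert, PySem.Dict.contains,
    PySem.Dict.getD, PySem.Dict.get?, PySem.Dict.empty]

lemma counter_two_ne (p q : String) (h : p ≠ q) :
    (PySem.Dict.counter [p, q]).items = [(p, 1), (q, 1)] := by
  simp [PySem.Dict.counter, PySem.Dict.modify, PySem.Dict.insert, PySem.Dict.contains,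
    PySem.Dict.getD, PySem.Dict.get?, PySem.Dict.empty, beq_iff_eq, h]

lemma counter_two_eq (p : String) : (PySem.Dict.counter [p, p]).items = [(p, 2)] := by
  simp [PySem.Dict.counter, PySem.Dict.modify, PySem.Dict.insert, PySem.Dict.contains,
    PySem.Dict.getD, PySem.Dict.get?, PySem.Dict.empty]

-- two +1 steps at the same key
lemma st2_same (r : PySem.Dict String Int) (K : String) :
    countStep (countStep r K) K = r.insert K (r.getD K 0 + 2) := by
  unfold countStep
  rw [PySem.Dict.getD_insert_self, PySem.Dict.insert_insert_self]
  ring_nf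

-- four +1 steps at the same key
lemma st4_same (r : PySem.Dict String Int) (K : String) :
    countStep (countStep (countStep (countStep r K) K) K) K = r.insert K (r.getD K 0 + 4) := by
  rw [st2_same]
  unfold countStep
  rw [PySem.Dict.getD_insert_self, PySem.Dict.insert_insert_self,
      PySem.Dict.getD_insert_self, PySem.Dict.insert_insert_self]
  ring_nf

-- interleaved +1 steps K1,K2,K1,K2 at two distinct keys group into +2,+2
lemma st4_comm (r : PySem.Dict String Int) (K1 K2 : String) (h : K1 ≠ K2) :
    countStep (countStep (countStep (countStep r K1) K2) K1) K2 =
    (r.insert K1 (r.getD K1 0 + 2)).insert K2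
      ((r.insert K1 (r.getD K1 0 + 2)).getD K2 0 + 2) := by
  unfold countStep
  rw [PySem.Dict.getD_insert_of_ne _ _ _ h,
      PySem.Dict.getD_insert_self,
      ins_comm _ _ _ _ _ _ h,
      PySem.Dict.getD_insert_self,
      PySem.Dict.insert_insert_self,
      PySem.Dict.getD_insert_of_ne _ _ _ h.symm, PySem.Dict.getD_insert_of_ne _ _ _ h.symm]
  ring_nf

-- the central block identity: for one fixed allele pair (left factors f, right factors g),
-- A's 4-fold +1 enumeration equals B's product of the two marginal tallies
lemma block (f g : Char → List Char) (D1 M2 : List Char) (hD : D1.length ≤ 2) (hM : M2.length ≤ 2) (r : PySem.Dict String Int) :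
    D1.foldl (fun r d1 => M2.foldl (fun r m2 =>
        countStep r (String.ofList (f d1 ++ g m2))) r) r
    = (PySem.Dict.counter (D1.map (fun d => String.ofList (f d)))).items.foldl (fun r p1 =>
        (PySem.Dict.counter (M2.map (fun m2 => String.ofList (g m2)))).items.foldl (fun r p2 =>
          r.insert (p1.1 ++ p2.1) (r.getD (p1.1 ++ p2.1) 0 + p1.2 * p2.2)) r) r := by
  match D1, hD with
  | [], _ => simp [PySem.Dict.counter, PySem.Dict.empty]
  | [a], _ =>
    match M2, hM with
    | [], _ => simp [PySem.Dict.counter, PySem.Dict.empty]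
    | [x], _ =>
      simp [counter_one, List.foldl, ← String.ofList_append, countStep]
    | [x, y], _ =>
      by_cases hg : g x = g y
      · simp only [List.map_cons, List.map_nil, List.foldl, hg, counter_one, counter_two_eq,
          ← String.ofList_append, st2_same]
        norm_num
      · have : String.ofList (g x) ≠ String.ofList (g y) := by
          simpa [String.ofList_inj] using hg
        simp only [List.map_cons, List.map_nil, counter_one, counter_two_ne _ _ this, List.foldl,
          ← String.ofList_append, countStep]
        norm_num
  | [a, b], _ =>
    by_cases hfab : f a = f b
    · match M2, hM with
      | [], _ => simp [PySem.Dict.counter, PySem.Dict.empty]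
      | [x], _ =>
        simp only [List.map_cons, List.map_nil, List.foldl, hfab, counter_two_eq, counter_one,
          ← String.ofList_append, st2_same]
        norm_num
      | [x, y], _ =>
        by_cases hg : g x = g y
        · simp only [List.map_cons, List.map_nil, List.foldl, hfab, hg, counter_two_eq,
            ← String.ofList_append, st4_same]
          norm_num
        · have hKK : String.ofList (f b ++ g x) ≠ String.ofList (f b ++ g y) := by
            simp only [ne_eq, String.ofList_inj]
            intro hcon; exact hg (List.append_cancel_left hcon)
          have huv : String.ofList (g x) ≠ String.ofList (g y) := by
            simpa [String.ofList_inj] using hg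
          simp only [List.map_cons, List.map_nil, List.foldl, hfab, counter_two_eq,
            counter_two_ne _ _ huv, ← String.ofList_append, st4_comm _ _ _ hKK]
          norm_num
    · have hpq : String.ofList (f a) ≠ String.ofList (f b) := by
        simpa [String.ofList_inj] using hfab
      match M2, hM with
      | [], _ => simp [PySem.Dict.counter, PySem.Dict.empty]
      | [x], _ =>
        simp only [List.map_cons, List.map_nil, counter_two_ne _ _ hpq, counter_one, List.foldl,
          ← String.ofList_append, countStep]
        norm_num
      | [x, y], _ =>
        by_cases hg : g x = g y
        · simp only [List.map_cons, List.map_nil, List.foldl, hg, counter_two_ne _ _ hpq,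
            counter_two_eq, ← String.ofList_append, st2_same]
          norm_num
        · have : String.ofList (g x) ≠ String.ofList (g y) := by
            simpa [String.ofList_inj] using hg
          simp only [List.map_cons, List.map_nil, counter_two_ne _ _ hpq, counter_two_ne _ _ this,
            List.foldl, ← String.ofList_append, countStep]
          norm_num

-- ===== VERDICT (by name: the statement is the Claim_ definition above) =====
theorem mendels_second_law_spec : Claim_equal_mendels_second_law := by
  intro dad mom _
  unfold Spec_mendels_second_law mendels_second_law mendels_second_law_alt
  simp only [PySem.List.foldl_append_singleton_eq_map, PySem.List.foldl_append_eq_flatMap,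
    List.nil_append, count_step, PySem.Dict.foldl_insert_getD_add_one_eq_counter]
  simp only [List.foldl_flatMap, List.foldl_map]
  apply congrArg PySem.Dict.items
  congr 1
  funext r m
  congr 1
  funext r' d2
  exact block (fun d1 => PySem.List.sorted [m, d1] (fun x => x))
    (fun m2 => PySem.List.sorted [d2, m2] (fun x => x)) _ _
    (by simp [PySem.List.slice_to])
    (by simp [PySem.List.slice_toNat]) r'
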